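-- pv_equiv track=rewrite | github.com/mmicire/markmicire.com | tsv2resume/old/tsv2resume_nofold.py | nl_to_br_outside_tags
-- ===== SOURCE A (Python) =====
-- def nl_to_br_outside_tags(t: str) -> str:
--     """
--     Replace newlines with <br> only when:
--       - we're NOT inside an HTML tag, and
--       - the newline is NOT just pretty-printed whitespace between tags (e.g., '>\n  <').
--     This preserves multi-line HTML lists/blocks from getting extra <br>s between <li>s, etc.
--     """
--     out = []
--     in_tag = False
--     quote = None
--     i = 0
--     n = len(t)
--
--     def prev_nonspace(idx: int) -> str:
--         j = idx - 1
--         while j >= 0 and t[j].isspace():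
--             j -= 1
--         return t[j] if j >= 0 else ""
--
--     def next_nonspace(idx: int) -> str:
--         j = idx + 1
--         while j < n and t[j].isspace():
--             j += 1
--         return t[j] if j < n else ""
--
--     while i < n:
--         ch = t[i]
--         if in_tag:
--             # inside a tag: keep characters as-is (normalize raw newlines to a space)
--             if quote:
--                 if ch == quote:
--                     quote = None
--                 out.append(ch)
--             else:
--                 if ch in ("'", '"'):
--                     quote = ch
--                     out.append(ch)
--                 elif ch == ">":
--                     in_tag = False
--                     out.append(ch)
--                 elif ch == "\n":
--                     out.append(" ")
--                 else:
--                     out.append(ch)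
--             i += 1
--             continue
--
--         # outside tags
--         if ch == "<":
--             in_tag = True
--             out.append(ch)
--             i += 1
--             continue
--
--         if ch == "\n":
--             # If the newline is just formatting between tags (e.g., ">\n   <"), don't insert <br>
--             if prev_nonspace(i) == ">" and next_nonspace(i) == "<":
--                 # consume this newline AND any immediate whitespace after it
--                 i += 1
--                 while i < n and t[i].isspace():
--                     i += 1
--                 continue
--             # otherwise, real line break in text -> <br>
--             out.append("<br>")
--             i += 1
--             continue
--
--         out.append(ch)
--         i += 1
--
--     return "".join(out)
-- ===== SOURCE B (Python) =====
-- def nl_to_br_outside_tags(t: str) -> str: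
--     """
--     Replace newlines with <br> only outside HTML tags, skipping newlines that
--     are mere pretty-printing between tags. Single forward pass: the previous
--     non-space character is tracked incrementally and the index of the next
--     non-space character is precomputed in one backward pass.
--     """
--     n = len(t)
--     # nxt[j] = smallest index k >= j with t[k] not whitespace, else n
--     nxt = [n] * (n + 1)
--     for j in range(n - 1, -1, -1):
--         nxt[j] = j if not t[j].isspace() else nxt[j + 1]
--
--     out = []
--     in_tag = False
--     quote = None
--     prev = ""  # last non-space character of t seen so far
--     i = 0
--     while i < n:
--         ch = t[i]
--         if in_tag:
--             if quote:
--                 if ch == quote: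
--                     quote = None
--                 out.append(ch)
--             elif ch in ("'", '"'):
--                 quote = ch
--                 out.append(ch)
--             elif ch == ">":
--                 in_tag = False
--                 out.append(ch)
--             else:
--                 out.append(" " if ch == "\n" else ch)
--         elif ch == "<":
--             in_tag = True
--             out.append(ch)
--         elif ch == "\n":
--             k = nxt[i + 1]
--             if prev == ">" and k < n and t[k] == "<":
--                 # pretty-printing newline: jump past it and the whitespace run
--                 i = k
--                 continue
--             out.append("<br>")
--         else:
--             out.append(ch)
--         if not ch.isspace():
--             prev = ch
--         i += 1
--     return "".join(out)
-- ===== Notes on version B (the rewrite author's own statement) =====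
-- stated objective: alternative
-- what changed: A rescans backwards for the previous non-space char and forwards for the next non-space char (plus a whitespace-consuming inner while) at every newline; B instead tracks the previous non-space character incrementally and precomputes a next-non-space index array in one backward pass, so the main loop does O(1) work per character (a timing run's inputs did not show a measured speed-up).
import Mathlib
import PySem

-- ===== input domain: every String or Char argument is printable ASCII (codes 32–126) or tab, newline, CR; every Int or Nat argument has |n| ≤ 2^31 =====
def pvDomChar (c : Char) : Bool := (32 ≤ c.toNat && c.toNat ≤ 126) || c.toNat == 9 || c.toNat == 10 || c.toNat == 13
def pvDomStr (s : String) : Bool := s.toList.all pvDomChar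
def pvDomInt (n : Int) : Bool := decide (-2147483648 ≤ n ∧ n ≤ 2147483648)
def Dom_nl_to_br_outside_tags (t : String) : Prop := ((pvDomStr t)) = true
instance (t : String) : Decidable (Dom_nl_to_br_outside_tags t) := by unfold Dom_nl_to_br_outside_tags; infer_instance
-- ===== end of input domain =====

-- ===== PORT A =====
-- B replaces A's per-newline backward/forward whitespace scans by a previous-
-- non-space character tracked incrementally and a next-non-space index array
-- built in one backward pass (objective: alternative algorithm, same result).

-- A's local helper prev_nonspace(idx): scan j = idx-1 downward while t[j].isspace()
def pvPrevNS (cs : List Char) : Nat → Option Char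
  | 0 => none
  | j + 1 =>
    if PySem.Chars.isspace (cs.getD j ' ') then pvPrevNS cs j
    else some (cs.getD j ' ')

-- A's local helper next_nonspace(idx): scan forward from idx+1 (caller passes cs.drop (idx+1))
def pvNextNS : List Char → Option Char
  | [] => none
  | c :: r => if PySem.Chars.isspace c then pvNextNS r else some c

-- A's inner 'while i < n and t[i].isspace(): i += 1' (l = cs.drop i, i the counter)
def pvSkipSp : List Char → Nat → Nat
  | [], i => i
  | c :: r, i => if PySem.Chars.isspace c then pvSkipSp r (i + 1) else i

-- A's main while-loop; fuel = n bounds the iterations (i strictly increases each step)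
def pvLoopA (cs : List Char) : Nat → Nat → Bool → Option Char → List String → List String
  | 0, _, _, _, out => out
  | fuel + 1, i, inTag, quote, out =>
    if i < cs.length then
      let ch := cs.getD i ' '
      if inTag then
        match quote with
        | some q =>
          pvLoopA cs fuel (i + 1) inTag (if ch = q then none else some q)
            (out ++ [String.ofList [ch]])
        | none =>
          if ch = '\'' ∨ ch = '"' then
            pvLoopA cs fuel (i + 1) inTag (some ch) (out ++ [String.ofList [ch]])
          else if ch = '>' then
            pvLoopA cs fuel (i + 1) false none (out ++ [String.ofList [ch]])
          else if ch = '\n' then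
            pvLoopA cs fuel (i + 1) inTag none (out ++ [" "])
          else
            pvLoopA cs fuel (i + 1) inTag none (out ++ [String.ofList [ch]])
      else if ch = '<' then
        pvLoopA cs fuel (i + 1) true none (out ++ [String.ofList [ch]])
      else if ch = '\n' then
        if pvPrevNS cs i = some '>' ∧ pvNextNS (cs.drop (i + 1)) = some '<' then
          pvLoopA cs fuel (pvSkipSp (cs.drop (i + 1)) (i + 1)) inTag quote out
        else
          pvLoopA cs fuel (i + 1) inTag quote (out ++ ["<br>"])
      else
        pvLoopA cs fuel (i + 1) inTag quote (out ++ [String.ofList [ch]])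
    else out

def nl_to_br_outside_tags (t : String) : String :=
  PySem.Str.join "" (pvLoopA t.toList t.toList.length 0 false none [])

-- ===== PORT B =====
-- B's backward pass: entry j is the smallest k ≥ j with t[k] non-space, else n
-- (right-fold form of the backward for-loop; start = absolute position of cs's head)
def pvBuildNxt (cs : List Char) (start n : Nat) : List Nat :=
  match cs with
  | [] => [n]
  | c :: rest =>
    let tail := pvBuildNxt rest (start + 1) n
    (if PySem.Chars.isspace c then tail.headD n else start) :: tail

-- B's main while-loop; prev carries the last non-space character seen so far
def pvLoopB (cs : List Char) (nxt : List Nat) :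
    Nat → Nat → Bool → Option Char → Option Char → List String → List String
  | 0, _, _, _, _, out => out
  | fuel + 1, i, inTag, quote, prev, out =>
    if i < cs.length then
      let ch := cs.getD i ' '
      let prev' := if PySem.Chars.isspace ch then prev else some ch
      if inTag then
        match quote with
        | some q =>
          pvLoopB cs nxt fuel (i + 1) inTag (if ch = q then none else some q) prev'
            (out ++ [String.ofList [ch]])
        | none =>
          if ch = '\'' ∨ ch = '"' then
            pvLoopB cs nxt fuel (i + 1) inTag (some ch) prev' (out ++ [String.ofList [ch]])
          else if ch = '>' then
            pvLoopB cs nxt fuel (i + 1) false none prev' (out ++ [String.ofList [ch]])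
          else
            pvLoopB cs nxt fuel (i + 1) inTag none prev'
              (out ++ [if ch = '\n' then " " else String.ofList [ch]])
      else if ch = '<' then
        pvLoopB cs nxt fuel (i + 1) true none prev' (out ++ [String.ofList [ch]])
      else if ch = '\n' then
        let k := nxt.getD (i + 1) cs.length
        if prev = some '>' ∧ k < cs.length ∧ cs.getD k ' ' = '<' then
          pvLoopB cs nxt fuel k inTag quote prev out
        else
          pvLoopB cs nxt fuel (i + 1) inTag quote prev' (out ++ ["<br>"])
      else
        pvLoopB cs nxt fuel (i + 1) inTag quote prev' (out ++ [String.ofList [ch]])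
    else out

def nl_to_br_outside_tags_alt (t : String) : String :=
  let cs := t.toList
  PySem.Str.join "" (pvLoopB cs (pvBuildNxt cs 0 cs.length) cs.length 0 false none none [])

-- ===== PRECONDITION & SPEC =====
def Spec_nl_to_br_outside_tags (t : String) (out : String) : Prop := out = nl_to_br_outside_tags_alt t
instance (t : String) (out : String) : Decidable (Spec_nl_to_br_outside_tags t out) := by unfold Spec_nl_to_br_outside_tags; infer_instance

-- ===== CLAIM (what is proved, stated in full; the proofs are below) =====
def Claim_equal_nl_to_br_outside_tags : Prop := ∀ (t : String), Dom_nl_to_br_outside_tags t → Spec_nl_to_br_outside_tags t (nl_to_br_outside_tags t)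

-- ===== LEMMAS AND PROOFS =====

lemma pvHeadD_getD {A : Type} (l : List A) (d : A) : l.headD d = l.getD 0 d := by
  cases l <;> rfl

-- the nxt array holds exactly the index A's whitespace-skipping loop reaches
lemma pvBuildNxt_getD (cs : List Char) :
    ∀ (start j : Nat), j ≤ cs.length →
      (pvBuildNxt cs start (start + cs.length)).getD j (start + cs.length)
        = pvSkipSp (cs.drop j) (start + j) := by
  induction cs with
  | nil =>
    intro start j hj
    have : j = 0 := Nat.le_zero.mp hj
    subst this; simp [pvBuildNxt, pvSkipSp]
  | cons c rest ih =>
    intro start j hj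
    have harr : start + (c :: rest).length = (start + 1) + rest.length := by
      simp [List.length_cons]; omega
    cases j with
    | zero =>
      rw [harr]
      by_cases hs : PySem.Chars.isspace c
      · have h0 := ih (start + 1) 0 (Nat.zero_le _)
        simp only [List.drop_zero, Nat.add_zero] at h0
        simp only [pvBuildNxt, pvSkipSp, hs, if_pos, List.drop_zero, Nat.add_zero]
        rw [show ∀ (x : Nat) (l : List Nat) (d : Nat), (x :: l).getD 0 d = x from fun _ _ _ => rfl]
        rw [pvHeadD_getD]
        exact h0
      · simp [pvBuildNxt, pvSkipSp, hs]
    | succ r =>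
      have h := ih (start + 1) r (by simpa using hj)
      rw [harr]
      simp only [pvBuildNxt, List.drop_succ_cons]
      rw [show ∀ (x : Nat) (l : List Nat) (r : Nat) (d : Nat), (x :: l).getD (r+1) d = l.getD r d
            from fun _ _ _ _ => rfl]
      rw [show start + (r + 1) = (start + 1) + r by omega]
      exact h

-- A's forward scan agrees with the skip index: pvNextNS finds the char at pvSkipSp
lemma pvNextNS_skip (l : List Char) : ∀ (start : Nat),
    (pvNextNS l = none ∧ pvSkipSp l start = start + l.length)
    ∨ (∃ k, pvSkipSp l start = start + k ∧ k < l.length ∧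
        PySem.Chars.isspace (l.getD k ' ') = false ∧ pvNextNS l = some (l.getD k ' ')) := by
  induction l with
  | nil => intro start; left; simp [pvNextNS, pvSkipSp]
  | cons c r ih =>
    intro start
    by_cases hs : PySem.Chars.isspace c
    · rcases ih (start + 1) with ⟨h1, h2⟩ | ⟨k, h1, h2, h3, h4⟩
      · left; constructor
        · simp [pvNextNS, hs, h1]
        · simp [pvSkipSp, hs, h2, List.length_cons]; omega
      · right; exact ⟨k + 1, by simp [pvSkipSp, hs, h1]; omega,
          by simpa using h2, by simpa using h3, by simp [pvNextNS, hs, h4]⟩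
    · right; exact ⟨0, by simp [pvSkipSp, hs], by simp, by simpa using hs,
        by simp [pvNextNS, hs]⟩

-- skipping whitespace does not change the previous non-space character
lemma pvPrevNS_skip (l : List Char) : ∀ (cs : List Char) (j : Nat), cs.drop j = l →
    pvPrevNS cs (pvSkipSp l j) = pvPrevNS cs j := by
  induction l with
  | nil => intro cs j _; simp [pvSkipSp]
  | cons c r ih =>
    intro cs j hd
    have hj : j < cs.length := by
      by_contra h
      simp [List.drop_eq_nil_of_le (Nat.le_of_not_lt h)] at hd
    have hq : cs[j]? = some c := by rw [← List.head?_drop, hd]; rfl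
    have hc' : cs[j]?.getD ' ' = c := by rw [hq]; rfl
    by_cases hs : PySem.Chars.isspace c = true
    · have hd' : cs.drop (j + 1) = r := by
        have := congrArg List.tail hd
        simpa [List.tail_drop] using this
      have hih := ih cs (j + 1) hd'
      simp only [pvSkipSp, hs, if_pos]
      rw [hih]
      simp [pvPrevNS, List.getD, hc', hs]
    · simp [pvSkipSp, hs]

-- main invariant: B's loop with prev = pvPrevNS cs i mirrors A's loop step for step
lemma pvLoop_eq (cs : List Char) :
    ∀ (fuel i : Nat) (inTag : Bool) (q : Option Char) (out : List String),
      pvLoopA cs fuel i inTag q out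
        = pvLoopB cs (pvBuildNxt cs 0 cs.length) fuel i inTag q (pvPrevNS cs i) out := by
  intro fuel
  induction fuel with
  | zero => intro i inTag q out; rfl
  | succ fuel ih =>
    intro i inTag q out
    simp only [pvLoopA, pvLoopB]
    by_cases hi : i < cs.length
    · rw [if_pos hi, if_pos hi]
      generalize hch : cs.getD i ' ' = ch
      have hprev : (if PySem.Chars.isspace ch = true then pvPrevNS cs i else some ch)
          = pvPrevNS cs (i + 1) := by rw [pvPrevNS, hch]
      by_cases hTag : inTag = true
      · rw [if_pos hTag, if_pos hTag]
        cases q with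
        | some qc =>
          simp only []
          rw [ih, hprev]
        | none =>
          simp only []
          by_cases h1 : ch = '\'' ∨ ch = '"'
          · rw [if_pos h1, if_pos h1, ih, hprev]
          · rw [if_neg h1, if_neg h1]
            by_cases h2 : ch = '>'
            · rw [if_pos h2, if_pos h2, ih, hprev]
            · rw [if_neg h2, if_neg h2]
              by_cases h3 : ch = '\n'
              · rw [if_pos h3, if_pos h3, ih, hprev]
              · rw [if_neg h3, if_neg h3, ih, hprev]
      · rw [if_neg hTag, if_neg hTag]
        by_cases h1 : ch = '<'
        · rw [if_pos h1, if_pos h1, ih, hprev]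
        · rw [if_neg h1, if_neg h1]
          by_cases h2 : ch = '\n'
          · rw [if_pos h2, if_pos h2]
            have hk : (pvBuildNxt cs 0 cs.length).getD (i + 1) cs.length
                = pvSkipSp (cs.drop (i + 1)) (i + 1) := by
              have h := pvBuildNxt_getD cs 0 (i + 1) (by omega)
              simpa using h
            have hlen : (cs.drop (i + 1)).length = cs.length - (i + 1) := by simp
            have hsp : PySem.Chars.isspace ch = true := by rw [h2]; decide
            have hprev1 : pvPrevNS cs (i + 1) = pvPrevNS cs i := by
              rw [← hprev, if_pos hsp]
            have hcond : (pvNextNS (cs.drop (i + 1)) = some '<') ↔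
                ((pvBuildNxt cs 0 cs.length).getD (i + 1) cs.length < cs.length ∧
                 cs.getD ((pvBuildNxt cs 0 cs.length).getD (i + 1) cs.length) ' ' = '<') := by
              rw [hk]
              rcases pvNextNS_skip (cs.drop (i + 1)) (i + 1) with ⟨hn1, hn2⟩ | ⟨k0, hn1, hn2, _, hn4⟩
              · rw [hn1, hn2, hlen]
                constructor
                · intro h; exact absurd h (by simp)
                · intro h; omega
              · rw [hn1, hn4]
                have hgd : (cs.drop (i + 1)).getD k0 ' ' = cs.getD (i + 1 + k0) ' ' := by
                  simp [List.getD, List.getElem?_drop]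
                constructor
                · intro h
                  refine ⟨by omega, ?_⟩
                  rw [← hgd]
                  exact Option.some.inj h
                · intro ⟨_, h⟩
                  rw [hgd, h]
            by_cases hA : pvPrevNS cs i = some '>' ∧ pvNextNS (cs.drop (i + 1)) = some '<'
            · have hB : pvPrevNS cs i = some '>' ∧
                  (pvBuildNxt cs 0 cs.length).getD (i + 1) cs.length < cs.length ∧
                  cs.getD ((pvBuildNxt cs 0 cs.length).getD (i + 1) cs.length) ' ' = '<' :=
                ⟨hA.1, hcond.mp hA.2⟩
              rw [if_pos hA, if_pos hB, ih, hk,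
                pvPrevNS_skip (cs.drop (i + 1)) cs (i + 1) rfl, hprev1]
            · have hB : ¬ (pvPrevNS cs i = some '>' ∧
                  (pvBuildNxt cs 0 cs.length).getD (i + 1) cs.length < cs.length ∧
                  cs.getD ((pvBuildNxt cs 0 cs.length).getD (i + 1) cs.length) ' ' = '<') := by
                intro ⟨ha, hb⟩; exact hA ⟨ha, hcond.mpr hb⟩
              rw [if_neg hA, if_neg hB, ih, hprev]
          · rw [if_neg h2, if_neg h2, ih, hprev]
    · rw [if_neg hi, if_neg hi]

-- ===== VERDICT (by name: the statement is the Claim_ definition above) =====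
theorem nl_to_br_outside_tags_spec : Claim_equal_nl_to_br_outside_tags := by
  intro t _
  unfold Spec_nl_to_br_outside_tags nl_to_br_outside_tags nl_to_br_outside_tags_alt
  simp [pvLoop_eq, pvPrevNS]
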